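-- pv_equiv track=rewrite | github.com/Lasso1101/PiGEoN | getOpCL.py | catg
-- ===== SOURCE A (Python) =====
-- def catg(op, index):
--     '''
--     categorize cell lines in op according to their cancer type in index
--     '''
--     allCat = {}
--     for cell in op:
--         if index[cell] in allCat.keys():
--             allCat[index[cell]].append(cell)
--         else:
--             allCat[index[cell]] = [cell]
--
--     return allCat
-- ===== SOURCE B (Python) =====
-- def catg(op, index):
--     '''
--     categorize cell lines in op according to their cancer type in index
--     '''
--     cats = list(dict.fromkeys(index[cell] for cell in op))
--     return {c: [cell for cell in op if index[cell] == c] for c in cats}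
-- ===== Notes on version B (the rewrite author's own statement) =====
-- stated objective: alternative
-- what changed: A builds the groups in one accumulating dict pass (append-or-insert per cell); B first computes the distinct categories in first-appearance order with dict.fromkeys and then builds each group by filtering op once per category.
import Mathlib
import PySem

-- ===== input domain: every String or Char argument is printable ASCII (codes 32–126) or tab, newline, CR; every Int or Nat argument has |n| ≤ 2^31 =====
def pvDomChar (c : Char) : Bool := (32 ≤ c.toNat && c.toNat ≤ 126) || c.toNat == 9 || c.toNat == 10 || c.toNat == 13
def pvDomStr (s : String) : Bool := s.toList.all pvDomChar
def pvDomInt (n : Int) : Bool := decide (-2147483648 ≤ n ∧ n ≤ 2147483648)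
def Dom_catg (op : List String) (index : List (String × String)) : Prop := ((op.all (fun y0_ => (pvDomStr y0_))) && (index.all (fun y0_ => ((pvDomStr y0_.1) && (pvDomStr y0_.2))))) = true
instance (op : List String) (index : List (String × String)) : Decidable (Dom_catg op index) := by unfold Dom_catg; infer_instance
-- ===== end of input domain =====

-- B replaces A's single accumulating dict pass by first collecting the distinct categories
-- (dict.fromkeys order) and then filtering op once per category; same dict on every input
-- where A returns (missing keys raise KeyError in both and are excluded by Pre_).

-- ===== PORT A =====
-- A: one pass over op, appending each cell to its category's list in an insertion-ordered dict.
-- index[cell] raises KeyError on a missing key: get? = none there (excluded by Pre_catg;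
-- the port then just keeps the accumulator, a value the claim never covers).
def catg (op : List String) (index : List (String × String)) : List (String × List String) :=
  let idx := PySem.Dict.ofList index
  (op.foldl (fun allCat cell =>
      match idx.get? cell with
      | none => allCat
      | some c =>
        if allCat.contains c then allCat.modify c [] (fun v => v ++ [cell])
        else allCat.insert c [cell])
    PySem.Dict.empty).items

-- ===== PORT B =====
-- B: cats = list(dict.fromkeys(index[cell] for cell in op)) — PySem.List.dedup; then a dict
-- comprehension filtering op per category. index[cell] in the generator is ported with
-- getD "" (exact wherever the Python returns, i.e. under Pre_catg).
def catg_alt (op : List String) (index : List (String × String)) : List (String × List String) :=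
  let idx := PySem.Dict.ofList index
  let cats := PySem.List.dedup (op.map (fun cell => (idx.get? cell).getD ""))
  cats.map (fun c => (c, op.filter (fun cell => idx.get? cell == some c)))

-- ===== PRECONDITION & SPEC =====
-- Pre_ excludes exactly the inputs where Python A raises KeyError: some cell of op is not a key of index.
def Pre_catg (op : List String) (index : List (String × String)) : Prop :=
  ∀ cell ∈ op, (PySem.Dict.ofList index).contains cell = true
instance (op : List String) (index : List (String × String)) : Decidable (Pre_catg op index) := by unfold Pre_catg; infer_instance
def pvWitness_catg : List String × (List (String × String)) :=
  (["a", "b", "a"], [("a", "lung"), ("b", "skin")])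
def Spec_catg (op : List String) (index : List (String × String)) (out : List (String × List String)) : Prop := out = catg_alt op index
instance (op : List String) (index : List (String × String)) (out : List (String × List String)) : Decidable (Spec_catg op index out) := by unfold Spec_catg; infer_instance

-- ===== CLAIM (what is proved, stated in full; the proofs are below) =====
def Claim_equal_catg : Prop := ∀ (op : List String) (index : List (String × String)), Dom_catg op index → Pre_catg op index → Spec_catg op index (catg op index)

-- ===== LEMMAS AND PROOFS =====

-- the category of a cell, as both ports compute it under Pre_
def pvKey (index : List (String × String)) (cell : String) : String :=
  (((PySem.Dict.ofList index).get? cell)).getD ""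

theorem pvGetSome (index : List (String × String)) (cell : String)
    (h : (PySem.Dict.ofList index).contains cell = true) :
    (PySem.Dict.ofList index).get? cell = some (pvKey index cell) := by
  rw [PySem.Dict.contains_eq_isSome_get?] at h
  cases hg : (PySem.Dict.ofList index).get? cell with
  | none => rw [hg] at h; simp at h
  | some c => simp [pvKey, hg]

-- A's branching step is, on any cell whose key is present, the uniform modify step
theorem pvStep (index : List (String × String))
    (allCat : PySem.Dict String (List String)) (cell : String)
    (h : (PySem.Dict.ofList index).contains cell = true) :
    (match (PySem.Dict.ofList index).get? cell with
      | none => allCat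
      | some c =>
        if allCat.contains c then allCat.modify c [] (fun v => v ++ [cell])
        else allCat.insert c [cell]) =
    allCat.modify (pvKey index cell) [] (fun v => v ++ [cell]) := by
  rw [pvGetSome index cell h]
  by_cases hc : allCat.contains (pvKey index cell) = true
  · simp [hc]
  · simp only [Bool.not_eq_true] at hc
    simp [hc, PySem.Dict.modify, PySem.Dict.insert,
      PySem.Dict.getD_of_not_contains _ _ hc]

-- ===== VERDICT (by name: the statement is the Claim_ definition above) =====
theorem catg_spec : Claim_equal_catg := by
  unfold Claim_equal_catg
  intro op index _ hpre
  unfold Spec_catg catg catg_alt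
  simp only []
  -- replace A's branching fold by the uniform modify fold
  rw [PySem.List.foldl_congr_mem op _
        (fun allCat cell => allCat.modify (pvKey index cell) [] (fun v => v ++ [cell]))
        PySem.Dict.empty
        (fun acc cell hmem => pvStep index acc cell (hpre cell hmem))]
  -- view it as a fold over the (key, cell) pairs
  have hmap : op.foldl (fun allCat cell => allCat.modify (pvKey index cell) [] (fun v => v ++ [cell]))
        PySem.Dict.empty
      = (op.map (fun cell => (pvKey index cell, cell))).foldl
          (fun d p => d.modify p.1 [] (fun v => v ++ [p.2])) PySem.Dict.empty := by
    rw [List.foldl_map]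
  rw [hmap]
  set D := (op.map (fun cell => (pvKey index cell, cell))).foldl
      (fun d p => d.modify p.1 [] (fun v => v ++ [p.2])) PySem.Dict.empty with hD
  have hnodup : D.keys.Nodup := by
    rw [hD]
    exact PySem.Dict.nodup_keys_foldl_modify_key _ _ _ _ _ (by simp)
  have hkeys : D.keys = PySem.List.dedup (op.map (fun cell => pvKey index cell)) := by
    rw [hD, PySem.Dict.keys_foldl_modify_key, List.map_map]
    have : (PySem.Dict.empty : PySem.Dict String (List String)).keys = [] := by simp
    rw [this]
    have h2 : PySem.Set.update [] (op.map ((fun p => p.1) ∘ fun cell => (pvKey index cell, cell)))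
        = PySem.List.dedup (op.map ((fun p => p.1) ∘ fun cell => (pvKey index cell, cell))) := by
      rw [PySem.List.dedup_eq_ofList]; rfl
    rw [h2]
    rfl
  have hget : ∀ c, D.getD c [] = op.filter (fun cell => pvKey index cell == c) := by
    intro c
    rw [hD, PySem.Dict.getD_foldl_modify_append, List.filter_map, List.map_map]
    simp [Function.comp_def]
  rw [PySem.Dict.items_eq_map_keys D hnodup [], hkeys]
  have hcats : PySem.List.dedup (op.map fun cell => ((PySem.Dict.ofList index).get? cell).getD "")
      = PySem.List.dedup (op.map fun cell => pvKey index cell) := rfl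
  rw [hcats]
  apply List.map_congr_left
  intro c _
  rw [hget c]
  congr 1
  apply List.filter_congr
  intro cell hmem
  rw [pvGetSome index cell (hpre cell hmem)]
  simp
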